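-- pv_equiv track=rewrite | github.com/pypi-data/pypi-mirror-213 | packages/CosmoTech-SupplyChain/CosmoTech_SupplyChain-4.1.2-py3-none-any.whl/Supplychain/Run/uncertainty_analysis_comets.py | extend_simple_dic
-- ===== SOURCE A (Python) =====
-- from copy import deepcopy
--
-- def extend_simple_dic(my_dic, number_of_iterations):
--     if my_dic != {}:  # checking that the dic isn't empty
--         extended_dic = {
--             0: my_dic[0]
--         }  # We assume that the uncertainty starts at the first time step
--         for i in range(1, number_of_iterations):
--             if i in my_dic:
--                 extended_dic[i] = deepcopy(my_dic[i])
--             else: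
--                 extended_dic[i] = deepcopy(extended_dic[i - 1])
--     else:
--         extended_dic = {}
--     return extended_dic
-- ===== SOURCE B (Python) =====
-- from copy import deepcopy
--
--
-- def extend_simple_dic(my_dic, number_of_iterations):
--     if my_dic == {}:
--         return {}
--     extended = {0: my_dic[0]}  # slot 0 keeps a direct reference (KeyError if 0 is absent)
--     # forward-fill by segments: between two consecutive present keys the value is constant
--     sources = [0] + sorted(k for k in my_dic if 1 <= k < number_of_iterations)
--     sources.append(number_of_iterations)
--     for s, e in zip(sources, sources[1:]):
--         v = my_dic[s]
--         for i in range(max(s, 1), e):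
--             extended[i] = deepcopy(v)
--     return extended
-- ===== Notes on version B (the rewrite author's own statement) =====
-- stated objective: alternative
-- what changed: B sorts the keys present in range once and fills whole constant segments between consecutive keys, instead of testing dict membership at every index and copying back the previously written slot.
import Mathlib
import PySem

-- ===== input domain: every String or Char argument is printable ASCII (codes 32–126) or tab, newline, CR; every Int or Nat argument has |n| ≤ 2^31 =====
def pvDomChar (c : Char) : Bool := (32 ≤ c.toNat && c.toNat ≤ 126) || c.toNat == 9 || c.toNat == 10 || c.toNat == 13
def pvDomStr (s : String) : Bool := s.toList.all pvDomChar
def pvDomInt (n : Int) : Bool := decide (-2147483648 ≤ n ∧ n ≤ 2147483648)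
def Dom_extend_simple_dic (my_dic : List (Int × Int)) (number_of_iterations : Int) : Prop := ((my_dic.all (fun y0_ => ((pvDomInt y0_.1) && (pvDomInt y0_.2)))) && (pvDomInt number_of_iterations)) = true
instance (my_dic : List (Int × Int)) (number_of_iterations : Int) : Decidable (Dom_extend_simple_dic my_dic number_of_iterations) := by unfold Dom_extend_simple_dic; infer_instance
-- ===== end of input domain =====

-- B forward-fills by sorting the present keys once and writing constant segments between
-- consecutive keys, instead of testing membership at every index and copying the previous slot
-- (alternative decomposition; deepcopy is the identity on the int values of this domain).

-- ===== PORT A =====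
def extend_simple_dic (my_dic : List (Int × Int)) (number_of_iterations : Int) : List (Int × Int) :=
  if my_dic ≠ [] then
    -- extended_dic = {0: my_dic[0]}; my_dic[0] raises KeyError when key 0 is absent (excluded by Pre_),
    -- so the .getD 0 default is never taken on admitted inputs
    ((PySem.List.pyRange 1 number_of_iterations).foldl
      (fun ext i =>
        if (PySem.Dict.mk my_dic).contains i then
          ext.insert i (((PySem.Dict.mk my_dic).get? i).getD 0)
        else
          ext.insert i ((ext.get? (i - 1)).getD 0))
      (PySem.Dict.empty.insert 0 (((PySem.Dict.mk my_dic).get? 0).getD 0))).items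
  else []

-- ===== PORT B =====
def extend_simple_dic_alt (my_dic : List (Int × Int)) (number_of_iterations : Int) : List (Int × Int) :=
  if my_dic = [] then []
  else
    -- sources = [0] + sorted(k for k in my_dic if 1 <= k < number_of_iterations) + [number_of_iterations]
    let sources : List Int :=
      (0 :: PySem.List.sorted ((my_dic.map Prod.fst).filter
        (fun k => decide (1 ≤ k) && decide (k < number_of_iterations))) (fun x => x)) ++ [number_of_iterations]
    -- zip(sources, sources[1:]); sources is nonempty, so sources[1:] is its tail
    -- {0: my_dic[0]} is the fold's initial dict; my_dic[s] at s = 0 raises KeyError when 0 is absent (excluded by Pre_)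
    ((sources.zip sources.tail).foldl
      (fun ext p =>
        (PySem.List.pyRange (max p.1 1) p.2).foldl
          (fun ext i => ext.insert i (((PySem.Dict.mk my_dic).get? p.1).getD 0)) ext)
      (PySem.Dict.empty.insert 0 (((PySem.Dict.mk my_dic).get? 0).getD 0))).items

-- ===== PRECONDITION & SPEC =====
-- Pre_ excludes (a) nonempty dicts without key 0, on which the Python A raises KeyError at my_dic[0]
-- (B raises the same KeyError there), and (b) association lists with duplicate keys, which do not
-- represent any Python dict.
def Pre_extend_simple_dic (my_dic : List (Int × Int)) (number_of_iterations : Int) : Prop :=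
  (my_dic.map Prod.fst).Nodup ∧ (my_dic ≠ [] → (0 : Int) ∈ my_dic.map Prod.fst)
instance (my_dic : List (Int × Int)) (number_of_iterations : Int) : Decidable (Pre_extend_simple_dic my_dic number_of_iterations) := by unfold Pre_extend_simple_dic; infer_instance

def pvWitness_extend_simple_dic : (List (Int × Int)) × Int := ([(0, 5), (2, 7)], 4)

def Spec_extend_simple_dic (my_dic : List (Int × Int)) (number_of_iterations : Int) (out : List (Int × Int)) : Prop := out = extend_simple_dic_alt my_dic number_of_iterations
instance (my_dic : List (Int × Int)) (number_of_iterations : Int) (out : List (Int × Int)) : Decidable (Spec_extend_simple_dic my_dic number_of_iterations out) := by unfold Spec_extend_simple_dic; infer_instance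

-- ===== CLAIM (what is proved, stated in full; the proofs are below) =====
def Claim_equal_extend_simple_dic : Prop := ∀ (my_dic : List (Int × Int)) (number_of_iterations : Int), Dom_extend_simple_dic my_dic number_of_iterations → Pre_extend_simple_dic my_dic number_of_iterations → Spec_extend_simple_dic my_dic number_of_iterations (extend_simple_dic my_dic number_of_iterations)

-- ===== LEMMAS AND PROOFS =====

-- the forward-filled list of pairs for the index list `is`, entering with current value `cur`
def pvFill (d : PySem.Dict Int Int) : List Int → Int → List (Int × Int)
  | [], _ => []
  | i :: is, cur =>
    let cur' := if d.contains i then (d.get? i).getD 0 else cur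
    (i, cur') :: pvFill d is cur'

-- the segment decomposition: constant block up to the next key, then that key's value, recurse
def pvSegs (d : PySem.Dict Int Int) (n : Int) : List Int → Int → Int → List (Int × Int)
  | [], a, cur => (PySem.List.pyRange a n).map (fun i => (i, cur))
  | k :: ks, a, cur =>
    (PySem.List.pyRange a k).map (fun i => (i, cur)) ++
      (k, (d.get? k).getD 0) :: pvSegs d n ks (k + 1) ((d.get? k).getD 0)

theorem pvFill_map_fst (d : PySem.Dict Int Int) (is : List Int) (cur : Int) :
    (pvFill d is cur).map Prod.fst = is := by
  induction is generalizing cur with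
  | nil => rfl
  | cons i is ih => simp [pvFill, ih]

theorem pvFill_no_keys (d : PySem.Dict Int Int) (is : List Int) (cur : Int)
    (h : ∀ i ∈ is, d.contains i = false) :
    pvFill d is cur = is.map (fun i => (i, cur)) := by
  induction is generalizing cur with
  | nil => rfl
  | cons i is ih =>
    simp only [pvFill, h i (by simp), List.map]
    exact congrArg _ (ih cur (fun j hj => h j (by simp [hj])))

theorem pvLemmaA (d : PySem.Dict Int Int) (m : Nat) :
    ∀ (j : Int) (ext : PySem.Dict Int Int) (cur : Int),
      (∀ k ∈ ext.keys, k < j) → ext.keys.Nodup → ext.get? (j - 1) = some cur →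
      ((PySem.List.pyRange j (j + m)).foldl
        (fun ext i =>
          if d.contains i then ext.insert i ((d.get? i).getD 0)
          else ext.insert i ((ext.get? (i - 1)).getD 0)) ext).items
      = ext.items ++ pvFill d (PySem.List.pyRange j (j + m)) cur := by
  induction m with
  | zero =>
    intro j ext cur _ _ _
    rw [PySem.List.pyRange_one_eq_nil (by omega)]
    simp [pvFill]
  | succ m ih =>
    intro j ext cur hlt hnd hget
    have hrw : j + ((m + 1 : Nat) : Int) = (j + 1) + (m : Nat) := by push_cast; ring
    rw [hrw, PySem.List.pyRange_one_cons (by omega), List.foldl_cons]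
    -- the step at index j writes cur' (the key's value if present, else the read-back of slot j-1)
    have hj : ext.contains j = false := by
      rw [← Bool.not_eq_true, PySem.Dict.contains_iff_mem_keys]
      intro hmem; exact absurd (hlt j hmem) (by omega)
    set cur' : Int := if d.contains j then (d.get? j).getD 0 else cur with hcur'
    have hstep :
        (if d.contains j then ext.insert j ((d.get? j).getD 0)
         else ext.insert j ((ext.get? (j - 1)).getD 0)) = ext.insert j cur' := by
      rw [hcur']
      by_cases hc : d.contains j <;> simp [hc, hget]
    rw [hstep]
    have h1 : ∀ k ∈ (ext.insert j cur').keys, k < j + 1 := by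
      intro k hk
      rcases (PySem.Dict.mem_keys_insert ext j k cur').mp hk with h | h
      · omega
      · exact lt_trans (hlt k h) (by omega)
    have h3 : (ext.insert j cur').get? (j + 1 - 1) = some cur' := by
      have : j + 1 - 1 = j := by ring
      rw [this, PySem.Dict.get?_insert_self]
    rw [ih (j + 1) (ext.insert j cur') cur' h1 (PySem.Dict.nodup_keys_insert ext j cur' hnd) h3]
    rw [PySem.Dict.items_insert_of_not_contains ext cur' hj]
    have hfill : pvFill d (j :: PySem.List.pyRange (j + 1) (j + 1 + (m : Nat))) cur
        = (j, cur') :: pvFill d (PySem.List.pyRange (j + 1) (j + 1 + (m : Nat))) cur' := by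
      simp [pvFill, hcur']
    rw [List.append_assoc, List.cons_append, List.nil_append, ← hfill]

theorem pvLemmaA' (d : PySem.Dict Int Int) (j b : Int) (ext : PySem.Dict Int Int) (cur : Int)
    (h1 : ∀ k ∈ ext.keys, k < j) (h2 : ext.keys.Nodup) (h3 : ext.get? (j - 1) = some cur) :
    ((PySem.List.pyRange j b).foldl
      (fun ext i =>
        if d.contains i then ext.insert i ((d.get? i).getD 0)
        else ext.insert i ((ext.get? (i - 1)).getD 0)) ext).items
    = ext.items ++ pvFill d (PySem.List.pyRange j b) cur := by
  rcases (by omega : b ≤ j ∨ j < b) with hb | hb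
  · rw [PySem.List.pyRange_one_eq_nil hb]; simp [pvFill]
  · have : b = j + ((b - j).toNat : Int) := by omega
    rw [this]
    exact pvLemmaA d (b - j).toNat j ext cur h1 h2 h3

theorem pvSegs_cons (d : PySem.Dict Int Int) (n : Int) (ks : List Int) (k cur : Int)
    (hkn : k < n) (hks : ∀ k' ∈ ks, k < k') :
    pvSegs d n ks k cur = (k, cur) :: pvSegs d n ks (k + 1) cur := by
  cases ks with
  | nil => simp [pvSegs, PySem.List.pyRange_one_cons hkn]
  | cons k' ks' =>
    simp [pvSegs, PySem.List.pyRange_one_cons (hks k' (by simp))]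

theorem pvFill_append_no_keys (d : PySem.Dict Int Int) (xs ys : List Int) (cur : Int)
    (h : ∀ i ∈ xs, d.contains i = false) :
    pvFill d (xs ++ ys) cur = xs.map (fun i => (i, cur)) ++ pvFill d ys cur := by
  induction xs generalizing cur with
  | nil => rfl
  | cons i is ih =>
    simp only [List.cons_append, pvFill, h i (by simp), List.map, Bool.false_eq_true, if_false]
    exact congrArg _ (ih cur (fun j hj => h j (by simp [hj])))

theorem pvSegs_eq_fill (d : PySem.Dict Int Int) (n : Int) :
    ∀ (ks : List Int) (a cur : Int), ks.Pairwise (· < ·) →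
      (∀ k ∈ ks, a ≤ k ∧ k < n) →
      (∀ i : Int, a ≤ i → i < n → (d.contains i = true ↔ i ∈ ks)) →
      pvSegs d n ks a cur = pvFill d (PySem.List.pyRange a n) cur := by
  intro ks
  induction ks with
  | nil =>
    intro a cur _ _ hchar
    rw [pvSegs, pvFill_no_keys]
    intro i hi
    rcases PySem.List.mem_pyRange_one.mp hi with ⟨hi1, hi2⟩
    have := hchar i hi1 hi2
    simp at this
    simpa using this
  | cons k ks ih =>
    intro a cur hpw hbnd hchar
    rcases List.pairwise_cons.mp hpw with ⟨hklt, hpw'⟩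
    have hak : a ≤ k := (hbnd k (by simp)).1
    have hkn : k < n := (hbnd k (by simp)).2
    -- split the range at k
    rw [PySem.List.pyRange_one_append a k n hak (by omega)]
    -- [a, k) holds no key
    have hnok : ∀ i ∈ PySem.List.pyRange a k, d.contains i = false := by
      intro i hi
      rcases PySem.List.mem_pyRange_one.mp hi with ⟨hi1, hi2⟩
      rw [← Bool.not_eq_true, hchar i hi1 (by omega)]
      intro hmem
      rcases List.mem_cons.mp hmem with h | h
      · omega
      · exact absurd (hklt i h) (by omega)
    rw [pvFill_append_no_keys d _ _ cur hnok]
    -- at k the key is present, then recurse from k + 1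
    have hck : d.contains k = true := (hchar k hak hkn).mpr (by simp)
    rw [PySem.List.pyRange_one_cons hkn]
    have hstep : pvFill d (k :: PySem.List.pyRange (k + 1) n) cur
        = (k, (d.get? k).getD 0) :: pvFill d (PySem.List.pyRange (k + 1) n) ((d.get? k).getD 0) := by
      simp [pvFill, hck]
    rw [hstep, pvSegs]
    rw [ih (k + 1) ((d.get? k).getD 0) hpw'
      (fun k' hk' => ⟨by have := hklt k' hk'; omega, (hbnd k' (by simp [hk'])).2⟩)
      (fun i hi1 hi2 => by
        rw [hchar i (by omega) hi2]
        constructor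
        · intro hmem
          rcases List.mem_cons.mp hmem with h | h
          · omega
          · exact h
        · intro h; exact List.mem_cons.mpr (Or.inr h))]

-- flattening B's nested fold into a single insert-fold over the flat pair list
theorem pvFoldFlat (d : PySem.Dict Int Int) (ps : List (Int × Int)) (ext : PySem.Dict Int Int) :
    ps.foldl
      (fun ext p =>
        (PySem.List.pyRange (max p.1 1) p.2).foldl
          (fun ext i => ext.insert i ((d.get? p.1).getD 0)) ext) ext
    = (ps.flatMap (fun p => (PySem.List.pyRange (max p.1 1) p.2).map
        (fun i => (i, (d.get? p.1).getD 0)))).foldl (fun ext q => ext.insert q.1 q.2) ext := by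
  induction ps generalizing ext with
  | nil => rfl
  | cons p ps ih =>
    simp only [List.foldl_cons, List.flatMap_cons, List.foldl_append]
    rw [ih, List.foldl_map]

theorem pvLemmaZ (d : PySem.Dict Int Int) (n : Int) :
    ∀ (ks : List Int) (s : Int), ks.Pairwise (· < ·) →
      (∀ k ∈ ks, max s 1 ≤ k ∧ k < n) →
      (((s :: ks) ++ [n]).zip (ks ++ [n])).flatMap
        (fun p => (PySem.List.pyRange (max p.1 1) p.2).map (fun i => (i, (d.get? p.1).getD 0)))
      = pvSegs d n ks (max s 1) ((d.get? s).getD 0) := by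
  intro ks
  induction ks with
  | nil =>
    intro s _ _
    simp [pvSegs]
  | cons k ks ih =>
    intro s hpw hbnd
    rcases List.pairwise_cons.mp hpw with ⟨hklt, hpw'⟩
    have hk1 : (1 : Int) ≤ k := le_trans (le_max_right s 1) (hbnd k (by simp)).1
    have hkmax : max k 1 = k := by omega
    have hkn : k < n := (hbnd k (by simp)).2
    have ihk := ih k hpw' (fun k' hk' => ⟨by have := hklt k' hk'; omega, (hbnd k' (by simp [hk'])).2⟩)
    rw [hkmax] at ihk
    simp only [List.cons_append, List.zip_cons_cons, List.flatMap_cons, pvSegs]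
    rw [← pvSegs_cons d n ks k ((d.get? k).getD 0) hkn hklt]
    exact congrArg _ ihk

-- ===== VERDICT (by name: the statement is the Claim_ definition above) =====
theorem extend_simple_dic_spec : Claim_equal_extend_simple_dic := by
  intro my_dic n _ hpre
  rcases hpre with ⟨hnd, h0mem⟩
  unfold Spec_extend_simple_dic
  by_cases hmt : my_dic = []
  · simp [extend_simple_dic, extend_simple_dic_alt, hmt]
  · have hndk : (PySem.Dict.mk my_dic).keys.Nodup := by
      simpa [PySem.Dict.keys, PySem.Dict.items] using hnd
    have hkeys : (PySem.Dict.mk my_dic).keys = my_dic.map Prod.fst := rfl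
    have hmemks : ∀ x : Int,
        x ∈ PySem.List.sorted ((my_dic.map Prod.fst).filter
          (fun k => decide (1 ≤ k) && decide (k < n))) (fun x => x)
        ↔ x ∈ my_dic.map Prod.fst ∧ 1 ≤ x ∧ x < n := by
      intro x
      rw [PySem.List.mem_sorted, List.mem_filter]
      simp
    have hpwlt : (PySem.List.sorted ((my_dic.map Prod.fst).filter
        (fun k => decide (1 ≤ k) && decide (k < n))) (fun x => x)).Pairwise (· < ·) := by
      have hle := PySem.List.sorted_pairwise ((my_dic.map Prod.fst).filter
        (fun k => decide (1 ≤ k) && decide (k < n))) (fun x => x)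
      have hndks : (PySem.List.sorted ((my_dic.map Prod.fst).filter
          (fun k => decide (1 ≤ k) && decide (k < n))) (fun x => x)).Nodup :=
        (PySem.List.sorted_perm _ _ _).symm.nodup (hnd.filter _)
      exact (hle.and hndks).imp (fun h => lt_of_le_of_ne h.1 h.2)
    -- ext0 facts
    have hc0 : (PySem.Dict.empty : PySem.Dict Int Int).contains 0 = false :=
      PySem.Dict.contains_empty 0
    have hitems0 : (PySem.Dict.empty.insert 0 (((PySem.Dict.mk my_dic).get? 0).getD 0)).items
        = [(0, ((PySem.Dict.mk my_dic).get? 0).getD 0)] := rfl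
    have hkeys0 : (PySem.Dict.empty.insert 0 (((PySem.Dict.mk my_dic).get? 0).getD 0)).keys
        = [0] := rfl
    -- A's side: the read-back fold is the forward fill
    have hA : extend_simple_dic my_dic n
        = (PySem.Dict.empty.insert 0 (((PySem.Dict.mk my_dic).get? 0).getD 0)).items
          ++ pvFill (PySem.Dict.mk my_dic) (PySem.List.pyRange 1 n)
              (((PySem.Dict.mk my_dic).get? 0).getD 0) := by
      unfold extend_simple_dic
      rw [if_pos hmt]
      exact pvLemmaA' (PySem.Dict.mk my_dic) 1 n _ _
        (by
          intro k hk
          rcases (PySem.Dict.mem_keys_insert _ _ _ _).mp hk with h | h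
          · omega
          · simp [PySem.Dict.keys, PySem.Dict.empty] at h)
        (PySem.Dict.nodup_keys_insert _ _ _ (by simp [PySem.Dict.keys, PySem.Dict.empty]))
        (by norm_num [PySem.Dict.get?_insert_self])
    -- B's side: flatten, then segments = forward fill
    have hchar : ∀ i : Int, (1 : Int) ≤ i → i < n →
        ((PySem.Dict.mk my_dic).contains i = true ↔
          i ∈ PySem.List.sorted ((my_dic.map Prod.fst).filter
            (fun k => decide (1 ≤ k) && decide (k < n))) (fun x => x)) := by
      intro i h1 h2
      rw [PySem.Dict.contains_iff_mem_keys, hkeys, hmemks]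
      constructor
      · intro h; exact ⟨h, h1, h2⟩
      · intro h; exact h.1
    have hbnd : ∀ k ∈ PySem.List.sorted ((my_dic.map Prod.fst).filter
        (fun k => decide (1 ≤ k) && decide (k < n))) (fun x => x),
        max (0 : Int) 1 ≤ k ∧ k < n := by
      intro k hk
      rcases (hmemks k).mp hk with ⟨_, h1, h2⟩
      constructor
      · simpa using h1
      · exact h2
    have hZ := pvLemmaZ (PySem.Dict.mk my_dic) n
      (PySem.List.sorted ((my_dic.map Prod.fst).filter
        (fun k => decide (1 ≤ k) && decide (k < n))) (fun x => x)) 0 hpwlt hbnd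
    have hS := pvSegs_eq_fill (PySem.Dict.mk my_dic) n
      (PySem.List.sorted ((my_dic.map Prod.fst).filter
        (fun k => decide (1 ≤ k) && decide (k < n))) (fun x => x)) 1
      (((PySem.Dict.mk my_dic).get? 0).getD 0) hpwlt
      (fun k hk => ⟨((hmemks k).mp hk).2.1, ((hmemks k).mp hk).2.2⟩) hchar
    have hmax01 : max (0 : Int) 1 = 1 := by norm_num
    rw [hmax01] at hZ
    have hB : extend_simple_dic_alt my_dic n
        = (PySem.Dict.empty.insert 0 (((PySem.Dict.mk my_dic).get? 0).getD 0)).items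
          ++ pvFill (PySem.Dict.mk my_dic) (PySem.List.pyRange 1 n)
              (((PySem.Dict.mk my_dic).get? 0).getD 0) := by
      unfold extend_simple_dic_alt
      rw [if_neg hmt]
      have htail : (((0 : Int) :: PySem.List.sorted ((my_dic.map Prod.fst).filter
          (fun k => decide (1 ≤ k) && decide (k < n))) (fun x => x)) ++ [n]).tail
          = PySem.List.sorted ((my_dic.map Prod.fst).filter
            (fun k => decide (1 ≤ k) && decide (k < n))) (fun x => x) ++ [n] := rfl
      show ((((0 :: PySem.List.sorted ((my_dic.map Prod.fst).filter
          (fun k => decide (1 ≤ k) && decide (k < n))) (fun x => x)) ++ [n]).zip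
          (((0 :: PySem.List.sorted ((my_dic.map Prod.fst).filter
            (fun k => decide (1 ≤ k) && decide (k < n))) (fun x => x)) ++ [n]).tail)).foldl
          (fun ext p =>
            (PySem.List.pyRange (max p.1 1) p.2).foldl
              (fun ext i => ext.insert i (((PySem.Dict.mk my_dic).get? p.1).getD 0)) ext)
          (PySem.Dict.empty.insert 0 (((PySem.Dict.mk my_dic).get? 0).getD 0))).items = _
      rw [htail, pvFoldFlat, hZ, hS]
      rw [PySem.Dict.items_foldl_insert_fresh _ Prod.fst Prod.snd _
        (by
          intro q hq
          have hq1 : q.1 ∈ PySem.List.pyRange 1 n := by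
            rw [← pvFill_map_fst (PySem.Dict.mk my_dic) (PySem.List.pyRange 1 n)
              (((PySem.Dict.mk my_dic).get? 0).getD 0)]
            exact List.mem_map_of_mem hq
          rcases PySem.List.mem_pyRange_one.mp hq1 with ⟨hge, _⟩
          rw [← Bool.not_eq_true, PySem.Dict.contains_iff_mem_keys]
          intro hmemq
          rcases (PySem.Dict.mem_keys_insert _ _ _ _).mp hmemq with h | h
          · omega
          · simp [PySem.Dict.keys, PySem.Dict.empty] at h)
        (by
          rw [pvFill_map_fst]
          exact PySem.List.nodup_pyRange_one 1 n)]
      simp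
    rw [hA, hB]
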